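-- pv_equiv track=rewrite | github.com/peachyplayzrb/thesis | 07_implementation/implementation_notes/bl008_transparency/build_bl008_explanation_payloads.py | build_ordered_components
-- ===== SOURCE A (Python) =====
-- COMPONENT_ORDER = [
--     "tempo",
--     "duration_ms",
--     "key",
--     "mode",
--     "lead_genre",
--     "genre_overlap",
--     "tag_overlap",
-- ]
--
-- def canonical_component_name(name: str) -> str:
--     return name.removesuffix("_score")
--
-- def build_ordered_components(active_weights: dict[str, object]) -> list[str]:
--     ordered_components: list[str] = []
--     active_keys = list(active_weights.keys())
--     for canonical in COMPONENT_ORDER: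
--         for component in active_keys:
--             if canonical_component_name(component) == canonical and component not in ordered_components:
--                 ordered_components.append(component)
--     ordered_set = set(ordered_components)
--     ordered_components.extend(sorted(component for component in active_keys if component not in ordered_set))
--     return ordered_components
-- ===== SOURCE B (Python) =====
-- COMPONENT_ORDER = [
--     "tempo",
--     "duration_ms",
--     "key",
--     "mode",
--     "lead_genre",
--     "genre_overlap",
--     "tag_overlap",
-- ]
--
-- def canonical_component_name(name: str) -> str:
--     return name.removesuffix("_score")
--
-- def build_ordered_components(active_weights: dict[str, object]) -> list[str]:
--     # One pass: bucket each key by the rank of its canonical name, then flatten.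
--     rank = {name: i for i, name in enumerate(COMPONENT_ORDER)}
--     buckets: list[list[str]] = [[] for _ in COMPONENT_ORDER]
--     unmatched: list[str] = []
--     for key in active_weights:
--         i = rank.get(canonical_component_name(key))
--         if i is None:
--             unmatched.append(key)
--         else:
--             buckets[i].append(key)
--     out = [key for bucket in buckets for key in bucket]
--     out.extend(sorted(unmatched))
--     return out
-- ===== Notes on version B (the rewrite author's own statement) =====
-- stated objective: alternative
-- what changed: A rescans the whole key list once per canonical component (with a membership test against the growing output); B makes a single bucketing pass over the keys using a rank dictionary built from COMPONENT_ORDER, then flattens the buckets and appends the sorted unmatched keys.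
import Mathlib
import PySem

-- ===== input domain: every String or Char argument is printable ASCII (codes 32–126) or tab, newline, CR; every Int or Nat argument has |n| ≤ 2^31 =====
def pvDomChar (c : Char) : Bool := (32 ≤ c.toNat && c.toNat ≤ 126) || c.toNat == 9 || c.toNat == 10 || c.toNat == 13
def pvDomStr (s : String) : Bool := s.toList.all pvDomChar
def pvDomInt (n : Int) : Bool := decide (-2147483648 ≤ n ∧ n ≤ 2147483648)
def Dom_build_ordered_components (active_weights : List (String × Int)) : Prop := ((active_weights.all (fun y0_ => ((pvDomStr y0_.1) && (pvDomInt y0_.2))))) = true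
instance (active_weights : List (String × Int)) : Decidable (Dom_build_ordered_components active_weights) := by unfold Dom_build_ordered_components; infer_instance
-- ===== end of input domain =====

-- B replaces A's nested rescan (one pass over all keys per canonical component) by a single
-- bucketing pass over the keys with a rank dictionary (objective: alternative).

-- ===== PORT A =====
def COMPONENT_ORDER : List String :=
  ["tempo", "duration_ms", "key", "mode", "lead_genre", "genre_overlap", "tag_overlap"]

-- name.removesuffix("_score"), ported by hand (PySem has no removesuffix); exact:
-- drop the 6 suffix chars iff the string ends with "_score".
def canonical_component_name (name : String) : String :=
  if "_score".toList.isSuffixOf name.toList then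
    String.ofList (name.toList.take (name.toList.length - 6))
  else name

-- list(active_weights.keys()): the dict's keys in insertion order = ordered dedup of the
-- association list's keys (first occurrence wins).
def build_ordered_components (active_weights : List (String × Int)) : List String :=
  let active_keys := PySem.List.dedup (active_weights.map Prod.fst)
  let ordered_components := COMPONENT_ORDER.foldl (fun acc canonical =>
      active_keys.foldl (fun acc2 component =>
        if canonical_component_name component == canonical && !acc2.contains component
        then acc2 ++ [component] else acc2) acc) ([] : List String)
  -- 'component not in ordered_set': set membership = membership in ordered_components
  ordered_components ++
    PySem.List.sorted (active_keys.filter (fun component => !ordered_components.contains component)) id false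

-- ===== PORT B =====
-- rank = {name: i for i, name in enumerate(COMPONENT_ORDER)}
def pv_rank : PySem.Dict String Int :=
  (PySem.List.enumerate COMPONENT_ORDER).foldl (fun d p => d.insert p.2 p.1) (PySem.Dict.mk [])

def build_ordered_components_alt (active_weights : List (String × Int)) : List String :=
  let buckets0 : List (List String) := COMPONENT_ORDER.map (fun _ => ([] : List String))
  let st := (PySem.List.dedup (active_weights.map Prod.fst)).foldl
      (fun st key =>
        match PySem.Dict.get? pv_rank (canonical_component_name key) with
        | none => (st.1, st.2 ++ [key])
        | some i => (PySem.List.pySetD st.1 i (PySem.List.pyGetD st.1 i ([] : List String) ++ [key]), st.2))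
      (buckets0, ([] : List String))
  st.1.flatMap id ++ PySem.List.sorted st.2 id false

-- ===== PRECONDITION & SPEC =====
def Spec_build_ordered_components (active_weights : List (String × Int)) (out : List String) : Prop := out = build_ordered_components_alt active_weights
instance (active_weights : List (String × Int)) (out : List String) : Decidable (Spec_build_ordered_components active_weights out) := by unfold Spec_build_ordered_components; infer_instance

-- ===== CLAIM (what is proved, stated in full; the proofs are below) =====
def Claim_equal_build_ordered_components : Prop := ∀ (active_weights : List (String × Int)), Dom_build_ordered_components active_weights → Spec_build_ordered_components active_weights (build_ordered_components active_weights)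

-- ===== LEMMAS AND PROOFS =====

-- rank lookup, characterised as a 7-way case split on the key
lemma rank_get (c : String) : PySem.Dict.get? pv_rank c =
    if c = "tempo" then some 0 else if c = "duration_ms" then some 1 else if c = "key" then some 2
    else if c = "mode" then some 3 else if c = "lead_genre" then some 4
    else if c = "genre_overlap" then some 5 else if c = "tag_overlap" then some 6 else none := by
  have h : pv_rank = PySem.Dict.mk [("tempo",0),("duration_ms",1),("key",2),("mode",3),
      ("lead_genre",4),("genre_overlap",5),("tag_overlap",6)] := by decide
  rw [h]
  split_ifs with h1 h2 h3 h4 h5 h6 h7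
  · subst h1; decide
  · subst h2; decide
  · subst h3; decide
  · subst h4; decide
  · subst h5; decide
  · subst h6; decide
  · subst h7; decide
  · simp only [PySem.Dict.get?, Option.map_eq_none_iff, List.find?_eq_none]
    rintro ⟨a,b⟩ hm
    simp only [List.mem_cons, List.not_mem_nil, or_false, Prod.mk.injEq] at hm
    rcases hm with ⟨rfl,rfl⟩|⟨rfl,rfl⟩|⟨rfl,rfl⟩|⟨rfl,rfl⟩|⟨rfl,rfl⟩|⟨rfl,rfl⟩|⟨rfl,rfl⟩ <;>
      (intro e; have e' := (beq_iff_eq.mp e).symm;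
       first | exact h1 e' | exact h2 e' | exact h3 e' | exact h4 e' | exact h5 e' | exact h6 e' | exact h7 e')

lemma rank_bounds {c : String} {i : Int} (h : PySem.Dict.get? pv_rank c = some i) :
    0 ≤ i ∧ i.toNat < 7 := by
  rw [rank_get] at h
  split_ifs at h <;> simp only [Option.some.injEq] at h <;> omega

lemma rank_none_iff (c : String) : PySem.Dict.get? pv_rank c = none ↔ c ∉ COMPONENT_ORDER := by
  rw [rank_get]
  split_ifs with h1 h2 h3 h4 h5 h6 h7 <;> simp_all [COMPONENT_ORDER]

-- the single bucketing pass of B, characterised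
lemma foldB (ks : List String) : ∀ (bs : List (List String)) (u : List String), bs.length = 7 →
    ks.foldl (fun st key =>
        match PySem.Dict.get? pv_rank (canonical_component_name key) with
        | none => (st.1, st.2 ++ [key])
        | some i => (PySem.List.pySetD st.1 i (PySem.List.pyGetD st.1 i ([] : List String) ++ [key]), st.2))
      (bs, u) =
    (bs.mapIdx (fun j b => b ++ ks.filter
        (fun k => PySem.Dict.get? pv_rank (canonical_component_name k) == some (j : Int))),
     u ++ ks.filter (fun k => (PySem.Dict.get? pv_rank (canonical_component_name k)).isNone)) := by
  induction ks with
  | nil =>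
    intro bs u _
    simp only [List.foldl_nil, List.filter_nil, List.append_nil, Prod.mk.injEq]
    constructor
    · apply List.ext_getElem <;> simp
    · trivial
  | cons k ks ih =>
    intro bs u hlen
    simp only [List.foldl_cons]
    cases h : PySem.Dict.get? pv_rank (canonical_component_name k) with
    | none =>
      simp only [h]
      rw [ih bs (u ++ [k]) hlen]
      simp [h]
    | some i =>
      obtain ⟨h0, h7⟩ := rank_bounds h
      have hlt : i < (bs.length : Int) := by omega
      simp only [h]
      rw [PySem.List.pySetD_of_nonneg _ _ h0,
          PySem.List.pyGetD_eq_getElem bs ([] : List String) h0 hlt]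
      rw [ih _ u (by simp [hlen])]
      simp only [Prod.mk.injEq]
      constructor
      · apply List.ext_getElem
        · simp [hlen]
        · intro j hj1 hj2
          simp only [List.getElem_mapIdx, List.getElem_set, List.filter_cons, h]
          have hcast : ((i.toNat : Nat) : Int) = i := Int.toNat_of_nonneg h0
          by_cases hji : i.toNat = j
          · subst hji
            simp [hcast, List.append_assoc]
          · have hne : (some i == some ((j : Nat) : Int)) = false := by
              simp only [beq_eq_false_iff_ne, ne_eq, Option.some.injEq]
              omega
            simp [hji, hne]
      · simp [h]

-- A's inner loop over the (duplicate-free) keys, for one canonical name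
lemma innerA (c : String) : ∀ (ks acc : List String), ks.Nodup →
    (∀ k ∈ ks, canonical_component_name k = c → k ∉ acc) →
    ks.foldl (fun acc2 component =>
        if canonical_component_name component == c && !acc2.contains component
        then acc2 ++ [component] else acc2) acc
      = acc ++ ks.filter (fun k => canonical_component_name k == c) := by
  intro ks
  induction ks with
  | nil => simp
  | cons k ks ih =>
    intro acc hnd hdisj
    simp only [List.foldl_cons, List.filter_cons]
    by_cases hc : canonical_component_name k = c
    · have hkacc : k ∉ acc := hdisj k (by simp) hc
      have hcond : (canonical_component_name k == c && !acc.contains k) = true := by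
        simp [hc, hkacc]
      rw [hcond]
      simp only [if_true]
      rw [ih (acc ++ [k]) hnd.of_cons ?_]
      · simp [hc]
      · intro k' hk' hck'
        simp only [List.mem_append, List.mem_singleton]
        rintro (h | rfl)
        · exact hdisj k' (by simp [hk']) hck' h
        · exact (List.nodup_cons.mp hnd).1 hk'
    · have hcond : (canonical_component_name k == c && !acc.contains k) = false := by simp [hc]
      rw [hcond]
      simp only [Bool.false_eq_true, if_false]
      rw [ih acc hnd.of_cons (fun k' h1 h2 => hdisj k' (by simp [h1]) h2)]
      simp [hc]

-- A's outer loop: one filtered block per canonical component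
lemma outerA (ks : List String) (hks : ks.Nodup) : ∀ (cs acc : List String), cs.Nodup →
    (∀ k ∈ ks, canonical_component_name k ∈ cs → k ∉ acc) →
    cs.foldl (fun acc canonical =>
        ks.foldl (fun acc2 component =>
          if canonical_component_name component == canonical && !acc2.contains component
          then acc2 ++ [component] else acc2) acc) acc
      = acc ++ cs.flatMap (fun c => ks.filter (fun k => canonical_component_name k == c)) := by
  intro cs
  induction cs with
  | nil => simp
  | cons c cs ih =>
    intro acc hnd hdisj
    simp only [List.foldl_cons, List.flatMap_cons]
    rw [innerA c ks acc hks (fun k hk hc => hdisj k hk (by simp [hc]))]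
    rw [ih (acc ++ ks.filter (fun k => canonical_component_name k == c)) hnd.of_cons ?_]
    · simp
    · intro k hk hck
      simp only [List.mem_append, List.mem_filter, beq_iff_eq]
      rintro (h | ⟨-, rfl⟩)
      · exact hdisj k hk (by simp [hck]) h
      · exact (List.nodup_cons.mp hnd).1 hck

lemma rank_piece (c s : String) (j : Int)
    (h : (s, j) ∈ [("tempo", (0:Int)), ("duration_ms", 1), ("key", 2), ("mode", 3),
                   ("lead_genre", 4), ("genre_overlap", 5), ("tag_overlap", 6)]) :
    (PySem.Dict.get? pv_rank c == some j) = (c == s) := by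
  fin_cases h <;> rw [rank_get] <;> split_ifs <;> simp_all

-- ===== VERDICT (by name: the statement is the Claim_ definition above) =====
theorem build_ordered_components_spec : Claim_equal_build_ordered_components := by
  intro aw _hdom
  unfold Spec_build_ordered_components
  simp only [build_ordered_components, build_ordered_components_alt]
  set ks := PySem.List.dedup (aw.map Prod.fst) with hks
  have hnd : ks.Nodup := PySem.List.nodup_dedup _
  rw [outerA ks hnd COMPONENT_ORDER [] (by decide) (by simp)]
  rw [foldB ks (COMPONENT_ORDER.map (fun _ => ([] : List String))) [] (by decide)]
  simp only [List.nil_append]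
  have hmatched : List.flatMap id
      (List.mapIdx (fun j b => b ++ List.filter
          (fun k => PySem.Dict.get? pv_rank (canonical_component_name k) == some (j : Int)) ks)
        (COMPONENT_ORDER.map (fun _ => ([] : List String)))) =
      COMPONENT_ORDER.flatMap (fun c => ks.filter (fun k => canonical_component_name k == c)) := by
    simp only [COMPONENT_ORDER, List.map_cons, List.map_nil, List.mapIdx_cons, List.mapIdx_nil,
      List.flatMap_cons, List.flatMap_nil, List.nil_append, List.append_nil, id]
    norm_num
    rw [List.filter_congr (fun k _ => rank_piece (canonical_component_name k) "tempo" 0 (by norm_num)),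
        List.filter_congr (fun k _ => rank_piece (canonical_component_name k) "duration_ms" 1 (by norm_num)),
        List.filter_congr (fun k _ => rank_piece (canonical_component_name k) "key" 2 (by norm_num)),
        List.filter_congr (fun k _ => rank_piece (canonical_component_name k) "mode" 3 (by norm_num)),
        List.filter_congr (fun k _ => rank_piece (canonical_component_name k) "lead_genre" 4 (by norm_num)),
        List.filter_congr (fun k _ => rank_piece (canonical_component_name k) "genre_overlap" 5 (by norm_num)),
        List.filter_congr (fun k _ => rank_piece (canonical_component_name k) "tag_overlap" 6 (by norm_num))]
  rw [hmatched]
  congr 2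
  apply List.filter_congr
  intro k hk
  by_cases hc : canonical_component_name k ∈ COMPONENT_ORDER
  · have hsome : PySem.Dict.get? pv_rank (canonical_component_name k) ≠ none := by
      rw [Ne, rank_none_iff]; simpa using hc
    have hmem : k ∈ COMPONENT_ORDER.flatMap (fun c => ks.filter (fun k => canonical_component_name k == c)) :=
      List.mem_flatMap.mpr ⟨canonical_component_name k, hc, List.mem_filter.mpr ⟨hk, by simp⟩⟩
    simp [hmem, Option.isNone_iff_eq_none, Option.isSome_iff_ne_none, hsome]
  · have hnone : PySem.Dict.get? pv_rank (canonical_component_name k) = none := (rank_none_iff _).mpr hc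
    have hmem : k ∉ COMPONENT_ORDER.flatMap (fun c => ks.filter (fun k => canonical_component_name k == c)) := by
      intro hm
      rcases List.mem_flatMap.mp hm with ⟨c, hcCO, hkf⟩
      rcases List.mem_filter.mp hkf with ⟨-, he⟩
      exact hc (by rw [beq_iff_eq.mp he]; exact hcCO)
    simp [hmem, hnone]
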